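-- pv_equiv track=rewrite | github.com/devLink-Developer/mastertrading | execution/management/commands/train_entry_filter_ml.py | _parse_strategy_list
-- ===== SOURCE A (Python) =====
-- def _parse_strategy_list(raw: str) -> list[str]:
--     items = []
--     for part in str(raw or "").split(","):
--         token = "".join(ch for ch in part.strip().lower() if ch.isalnum() or ch == "_").strip("_")
--         if token:
--             items.append(token)
--     # stable dedup
--     seen = set()
--     out: list[str] = []
--     for item in items:
--         if item not in seen:
--             seen.add(item)
--             out.append(item)
--     return out
-- ===== SOURCE B (Python) =====
-- def _parse_strategy_list(raw: str) -> list[str]: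
--     # single character-level scan: build each cleaned token in a buffer,
--     # flush on ',' with inline stable dedup (no intermediate items list)
--     text = str(raw or "")
--     seen = set()
--     out: list[str] = []
--     buf: list[str] = []
--     for ch in text + ",":
--         if ch == ",":
--             token = "".join(buf).strip("_")
--             buf = []
--             if token and token not in seen:
--                 seen.add(token)
--                 out.append(token)
--         else:
--             cl = ch.lower()
--             if cl.isalnum() or cl == "_":
--                 buf.append(cl)
--     return out
-- ===== Notes on version B (the rewrite author's own statement) =====
-- stated objective: alternative
-- what changed: Replaces split-into-parts + clean pass + separate dedup pass with a single character-level scanner that builds each cleaned token in a buffer and flushes it at every separator with inline stable dedup, never materialising the parts or items lists.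
import Mathlib
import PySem

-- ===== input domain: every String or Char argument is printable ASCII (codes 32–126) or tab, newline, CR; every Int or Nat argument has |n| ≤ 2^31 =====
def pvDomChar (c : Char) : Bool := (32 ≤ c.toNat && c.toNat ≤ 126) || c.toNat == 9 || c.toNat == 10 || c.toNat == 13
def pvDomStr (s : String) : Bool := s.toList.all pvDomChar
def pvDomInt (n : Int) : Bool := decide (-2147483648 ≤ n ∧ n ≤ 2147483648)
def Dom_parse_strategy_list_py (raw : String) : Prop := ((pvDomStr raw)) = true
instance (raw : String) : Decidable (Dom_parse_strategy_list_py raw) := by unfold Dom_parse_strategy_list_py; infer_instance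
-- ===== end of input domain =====

-- B replaces A's split + clean pass + separate dedup pass by one character-level
-- scan with an inline token buffer and inline stable dedup (objective: alternative).

-- ===== PORT A =====
def parse_strategy_list_py (raw : String) : List String :=
  -- str(raw or "")
  let text := if raw == "" then "" else raw
  let parts := PySem.Chars.splitOn text.toList [',']
  let items := parts.foldl (fun acc part =>
    let token := PySem.Chars.stripChars
      ((PySem.Chars.lower (PySem.Chars.strip part)).filter
        (fun ch => PySem.Chars.isalnum ch || ch == '_')) ['_']
    if token ≠ [] then acc ++ [token] else acc) []
  let res := items.foldl (fun st item =>
    if !(st.1.contains item) then (PySem.Set.add st.1 item, st.2 ++ [item]) else st)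
    (([] : PySem.Set (List Char)), ([] : List (List Char)))
  res.2.map String.mk

-- ===== PORT B =====
def parse_strategy_list_py_alt (raw : String) : List String :=
  -- str(raw or "")
  let text := if raw == "" then "" else raw
  let r := (text.toList ++ [',']).foldl (fun st ch =>
      if ch == ',' then
        let token := PySem.Chars.stripChars st.2.2 ['_']
        if token ≠ [] && !(st.1.contains token) then
          (PySem.Set.add st.1 token, st.2.1 ++ [token], ([] : List Char))
        else
          (st.1, st.2.1, ([] : List Char))
      else
        let cl := PySem.Chars.lowerChar ch
        if PySem.Chars.isalnum cl || cl == '_' then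
          (st.1, st.2.1, st.2.2 ++ [cl])
        else st)
    (([] : PySem.Set (List Char)), ([] : List (List Char)), ([] : List Char))
  r.2.1.map String.mk

-- ===== PRECONDITION & SPEC =====
def Spec_parse_strategy_list_py (raw : String) (out : List String) : Prop := out = parse_strategy_list_py_alt raw
instance (raw : String) (out : List String) : Decidable (Spec_parse_strategy_list_py raw out) := by unfold Spec_parse_strategy_list_py; infer_instance

-- ===== CLAIM (what is proved, stated in full; the proofs are below) =====
def Claim_equal_parse_strategy_list_py : Prop := ∀ (raw : String), Dom_parse_strategy_list_py raw → Spec_parse_strategy_list_py raw (parse_strategy_list_py raw)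

-- ===== LEMMAS AND PROOFS =====

/-- the character filter both programs apply (on already-lowered characters) -/
def pvPred (ch : Char) : Bool := PySem.Chars.isalnum ch || ch == '_'

/-- B's per-part cleaning: lower then filter -/
def pvCleanB (p : List Char) : List Char := (PySem.Chars.lower p).filter pvPred

/-- structural single-separator split (proof-side spec of `splitOn · [',']`) -/
def pvSplit : List Char → List (List Char)
  | [] => [[]]
  | c :: rest => if c = ',' then [] :: pvSplit rest else (pvSplit rest).modifyHead (c :: ·)

lemma pvSplit_ne_nil (l : List Char) : pvSplit l ≠ [] := by
  induction l with
  | nil => simp [pvSplit]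
  | cons c rest ih =>
    simp only [pvSplit]
    split
    · simp
    · cases h : pvSplit rest with
      | nil => exact absurd h ih
      | cons p ps => simp [List.modifyHead]

lemma pvSplitOn_go_spec (fuel : Nat) (l : List Char) (h : l.length < fuel)
    (cur : List Char) (acc : List (List Char)) :
    PySem.Chars.splitOn.go [','] fuel l cur acc
      = acc.reverse ++ (pvSplit l).modifyHead (cur.reverse ++ ·) := by
  induction fuel generalizing l cur acc with
  | zero => omega
  | succ fuel ih =>
    cases l with
    | nil =>
      simp [PySem.Chars.splitOn.go, pvSplit, List.modifyHead]
    | cons c rest =>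
      rw [PySem.Chars.splitOn.go]
      by_cases hc : c = ','
      · subst hc
        have hp : List.isPrefixOf [','] (',' :: rest) = true := by
          simp [List.isPrefixOf]
        simp only [hp, if_pos]
        rw [show List.drop (List.length [',']) (',' :: rest) = rest from rfl]
        rw [ih rest (by simpa using Nat.lt_of_succ_lt_succ h) [] (List.reverse cur :: acc)]
        simp only [pvSplit, if_pos rfl, List.modifyHead, List.reverse_cons, List.append_assoc,
          List.cons_append, List.nil_append, List.singleton_append]
        cases pvSplit rest <;> simp
      · have hp : List.isPrefixOf [','] (c :: rest) = false := by
          simp only [List.isPrefixOf, Bool.and_eq_false_iff, beq_eq_false_iff_ne, ne_eq]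
          exact Or.inl fun h' => hc h'.symm
        simp only [hp, Bool.false_eq_true, if_neg, not_false_iff]
        rw [ih rest (by simpa using Nat.lt_of_succ_lt_succ h) (c :: cur) acc]
        simp only [pvSplit, if_neg hc]
        congr 1
        obtain ⟨p, ps, hps⟩ : ∃ p ps, pvSplit rest = p :: ps := by
          cases hsp : pvSplit rest with
          | nil => exact absurd hsp (pvSplit_ne_nil rest)
          | cons p ps => exact ⟨p, ps, rfl⟩
        simp [hps, List.modifyHead]

lemma pvSplitOn_eq (l : List Char) :
    PySem.Chars.splitOn l [','] = pvSplit l := by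
  rw [PySem.Chars.splitOn, pvSplitOn_go_spec (l.length + 1) l (by omega) [] []]
  obtain ⟨p, ps, hps⟩ : ∃ p ps, pvSplit l = p :: ps := by
    cases hsp : pvSplit l with
    | nil => exact absurd hsp (pvSplit_ne_nil l)
    | cons p ps => exact ⟨p, ps, rfl⟩
  simp [hps, List.modifyHead]

/-- whitespace never survives the alnum/underscore filter, so A's `.strip()` is invisible after filtering -/
lemma pvPred_isspace (c : Char) (h : PySem.Chars.isspace c = true) :
    pvPred (PySem.Chars.lowerChar c) = false := by
  have hn : c.toNat = 32 ∨ (9 ≤ c.toNat ∧ c.toNat ≤ 13) ∨ (28 ≤ c.toNat ∧ c.toNat ≤ 31) ∨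
      c.toNat = 133 ∨ c.toNat = 160 ∨ c.toNat = 5760 ∨ (8192 ≤ c.toNat ∧ c.toNat ≤ 8202) ∨
      c.toNat = 8232 ∨ c.toNat = 8233 ∨ c.toNat = 8239 ∨ c.toNat = 8287 ∨ c.toNat = 12288 := by
    simp only [PySem.Chars.isspace, Bool.or_eq_true, Bool.and_eq_true, decide_eq_true_eq] at h
    tauto
  have hA : ('A').toNat = 65 := rfl
  have ha : ('a').toNat = 97 := rfl
  have h0 : ('0').toNat = 48 := rfl
  have hu : ('_').toNat = 95 := rfl
  have hup : PySem.Chars.isupper c = false := by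
    cases hcase : PySem.Chars.isupper c
    · rfl
    · exfalso
      simp only [PySem.Chars.isupper, Bool.and_eq_true, decide_eq_true_eq, Char.le_def] at hcase
      have h1 : 65 ≤ c.toNat ∧ c.toNat ≤ 90 := hcase
      omega
  have hlow : PySem.Chars.islower c = false := by
    cases hcase : PySem.Chars.islower c
    · rfl
    · exfalso
      simp only [PySem.Chars.islower, Bool.and_eq_true, decide_eq_true_eq, Char.le_def] at hcase
      have h1 : 97 ≤ c.toNat ∧ c.toNat ≤ 122 := hcase
      omega
  have hdig : PySem.Chars.isdigit c = false := by
    cases hcase : PySem.Chars.isdigit c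
    · rfl
    · exfalso
      simp only [PySem.Chars.isdigit, Bool.and_eq_true, decide_eq_true_eq, Char.le_def] at hcase
      have h1 : 48 ≤ c.toNat ∧ c.toNat ≤ 57 := hcase
      omega
  have hund : (c == '_') = false := by
    cases hcase : c == '_'
    · rfl
    · exfalso
      have h95 : c.toNat = 95 := by rw [(beq_iff_eq).mp hcase, hu]
      omega
  have hlc : PySem.Chars.lowerChar c = c := by
    simp [PySem.Chars.lowerChar, hup]
  rw [hlc]
  simp [pvPred, PySem.Chars.isalnum, PySem.Chars.isalpha, hup, hlow, hdig, hund]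

lemma pvFilter_lower_dropWhile (p : List Char) :
    (PySem.Chars.lower (p.dropWhile PySem.Chars.isspace)).filter pvPred
      = (PySem.Chars.lower p).filter pvPred := by
  induction p with
  | nil => rfl
  | cons c rest ih =>
    by_cases hc : PySem.Chars.isspace c = true
    · have hd : List.dropWhile PySem.Chars.isspace (c :: rest) = List.dropWhile PySem.Chars.isspace rest := by
        simp [List.dropWhile, hc]
      rw [hd, ih]
      simp [PySem.Chars.lower, List.filter_cons, pvPred_isspace c hc]
    · simp [List.dropWhile, hc]

/-- A's clean-of-stripped-part equals B's clean-of-raw-part -/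
lemma pvCleanA_eq_cleanB (p : List Char) :
    (PySem.Chars.lower (PySem.Chars.strip p)).filter pvPred = pvCleanB p := by
  have hr : ∀ q : List Char,
      (PySem.Chars.lower (PySem.Chars.rstrip q)).filter pvPred
        = (PySem.Chars.lower q).filter pvPred := by
    intro q
    have := pvFilter_lower_dropWhile q.reverse
    simp only [PySem.Chars.rstrip, PySem.Chars.lower, List.map_reverse, List.filter_reverse] at *
    have h2 := congrArg List.reverse this
    simpa using h2
  rw [PySem.Chars.strip, hr, PySem.Chars.lstrip, pvFilter_lower_dropWhile, pvCleanB]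

/-- B's cleaning distributes over cons -/
lemma pvCleanB_cons (c : Char) (p : List Char) :
    pvCleanB (c :: p) = (if pvPred (PySem.Chars.lowerChar c) then [PySem.Chars.lowerChar c] else []) ++ pvCleanB p := by
  simp only [pvCleanB, PySem.Chars.lower, List.map_cons, List.filter_cons]
  split <;> simp_all

/-- the scanner state: (seen, out, buffer) -/
def pvBStep (st : PySem.Set (List Char) × List (List Char) × List Char) (ch : Char) :
    PySem.Set (List Char) × List (List Char) × List Char :=
  if ch == ',' then
    let token := PySem.Chars.stripChars st.2.2 ['_']
    if token ≠ [] && !(st.1.contains token) then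
      (PySem.Set.add st.1 token, st.2.1 ++ [token], ([] : List Char))
    else
      (st.1, st.2.1, ([] : List Char))
  else
    let cl := PySem.Chars.lowerChar ch
    if PySem.Chars.isalnum cl || cl == '_' then
      (st.1, st.2.1, st.2.2 ++ [cl])
    else st

/-- flushing one cleaned (pre-strip) part into the (seen, out) state -/
def pvFlush (st : PySem.Set (List Char) × List (List Char)) (cleaned : List Char) :
    PySem.Set (List Char) × List (List Char) :=
  let token := PySem.Chars.stripChars cleaned ['_']
  if token ≠ [] && !(st.1.contains token) then (PySem.Set.add st.1 token, st.2 ++ [token]) else st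

lemma pvBStep_comma (buf : List Char) (st : PySem.Set (List Char) × List (List Char)) :
    pvBStep (st.1, st.2, buf) ',' = ((pvFlush st buf).1, (pvFlush st buf).2, ([] : List Char)) := by
  simp only [pvBStep, pvFlush]
  simp only [beq_self_eq_true, if_true]
  split <;> rfl

lemma pvBStep_other (c : Char) (hc : ¬ c = ',') (buf : List Char)
    (st : PySem.Set (List Char) × List (List Char)) :
    pvBStep (st.1, st.2, buf) c
      = (st.1, st.2, buf ++ (if pvPred (PySem.Chars.lowerChar c) then [PySem.Chars.lowerChar c] else [])) := by
  have hcc : (c == ',') = false := by simp [hc]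
  cases hpp : (PySem.Chars.isalnum (PySem.Chars.lowerChar c) || (PySem.Chars.lowerChar c == '_'))
  · simp [pvBStep, hcc, hpp, pvPred]
  · simp [pvBStep, hcc, hpp, pvPred]

lemma pvCleanB_nil : pvCleanB [] = [] := rfl

/-- main scanner lemma: scanning `l ++ [',']` = flushing the cleaned parts of `l` -/
lemma pvScan_eq (l : List Char) (buf : List Char)
    (st : PySem.Set (List Char) × List (List Char)) :
    List.foldl pvBStep (st.1, st.2, buf) (l ++ [','])
      = (let r := List.foldl pvFlush st (((pvSplit l).map pvCleanB).modifyHead (buf ++ ·));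
         (r.1, r.2, ([] : List Char))) := by
  induction l generalizing buf st with
  | nil =>
    simp [pvSplit, List.modifyHead, pvBStep_comma, pvCleanB_nil]
  | cons c rest ih =>
    by_cases hc : c = ','
    · subst hc
      simp only [List.cons_append, List.foldl_cons]
      rw [pvBStep_comma, ih [] (pvFlush st buf)]
      simp only [pvSplit, if_pos rfl, List.map_cons]
      obtain ⟨p, ps, hps⟩ : ∃ p ps, (pvSplit rest).map pvCleanB = p :: ps := by
        cases hsp : (pvSplit rest).map pvCleanB with
        | nil => exact absurd (List.map_eq_nil_iff.mp hsp) (pvSplit_ne_nil rest)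
        | cons p ps => exact ⟨p, ps, rfl⟩
      simp [hps, List.modifyHead, pvCleanB_nil]
    · simp only [List.cons_append, List.foldl_cons]
      rw [pvBStep_other c hc, ih _ st]
      simp only [pvSplit, if_neg hc]
      obtain ⟨p, ps, hps⟩ : ∃ p ps, pvSplit rest = p :: ps := by
        cases hsp : pvSplit rest with
        | nil => exact absurd hsp (pvSplit_ne_nil rest)
        | cons p ps => exact ⟨p, ps, rfl⟩
      simp [hps, List.modifyHead, pvCleanB_cons, List.append_assoc]

/-- folding A's dedup step over the nonempty tokens = folding pvFlush over the cleaned parts -/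
lemma pvDedup_filter_eq (cs : List (List Char))
    (st : PySem.Set (List Char) × List (List Char)) :
    List.foldl (fun st item =>
        if !(st.1.contains item) then (PySem.Set.add st.1 item, st.2 ++ [item]) else st) st
      (((cs.map (fun p => PySem.Chars.stripChars p ['_'])).filter (fun t => t ≠ [])))
      = List.foldl pvFlush st cs := by
  induction cs generalizing st with
  | nil => rfl
  | cons c rest ih =>
    simp only [List.map_cons, List.filter_cons]
    by_cases hne : PySem.Chars.stripChars c ['_'] = []
    · rw [if_neg (by simp [hne])]
      have hfl : pvFlush st c = st := by simp [pvFlush, hne]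
      rw [List.foldl_cons, hfl, ih]
    · rw [if_pos (by simp [hne])]
      simp only [List.foldl_cons]
      have hfl : pvFlush st c = (if !(st.1.contains (PySem.Chars.stripChars c ['_'])) then
          (PySem.Set.add st.1 (PySem.Chars.stripChars c ['_']),
            st.2 ++ [PySem.Chars.stripChars c ['_']]) else st) := by
        cases hmem : st.1.contains (PySem.Chars.stripChars c ['_'])
        · have hmem' : PySem.Chars.stripChars c ['_'] ∉ st.1 := by simpa using hmem
          simp [pvFlush, hne, hmem']
        · have hmem' : PySem.Chars.stripChars c ['_'] ∈ st.1 := by simpa using hmem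
          simp [pvFlush, hne, hmem']
      rw [ih, hfl]

lemma pvPred_def : (fun ch => PySem.Chars.isalnum ch || ch == '_') = pvPred := rfl

/-- A's per-part step, with the cleaning rewritten through pvCleanB -/
def pvAStepN (acc : List (List Char)) (part : List Char) : List (List Char) :=
  if PySem.Chars.stripChars (pvCleanB part) ['_'] ≠ [] then
    acc ++ [PySem.Chars.stripChars (pvCleanB part) ['_']]
  else acc

lemma pvAStep_eq :
    (fun (acc : List (List Char)) (part : List Char) =>
      let token := PySem.Chars.stripChars
        ((PySem.Chars.lower (PySem.Chars.strip part)).filter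
          (fun ch => PySem.Chars.isalnum ch || ch == '_')) ['_']
      if token ≠ [] then acc ++ [token] else acc) = pvAStepN := by
  funext acc part
  simp only [pvPred_def, pvCleanA_eq_cleanB, pvAStepN]

/-- A's first pass builds exactly the nonempty stripped cleaned tokens, in order -/
lemma pvItems_eq (l : List (List Char)) (acc : List (List Char)) :
    l.foldl pvAStepN acc
    = acc ++ ((l.map pvCleanB).map (fun p => PySem.Chars.stripChars p ['_'])).filter (fun t => t ≠ []) := by
  induction l generalizing acc with
  | nil => simp
  | cons p rest ih =>
    simp only [List.foldl_cons, List.map_cons, List.filter_cons]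
    by_cases hne : PySem.Chars.stripChars (pvCleanB p) ['_'] ≠ []
    · rw [show pvAStepN acc p = acc ++ [PySem.Chars.stripChars (pvCleanB p) ['_']] from by
        simp [pvAStepN, hne], ih]
      rw [if_pos (by simpa using hne)]
      simp
    · rw [show pvAStepN acc p = acc from by simp [pvAStepN, hne], ih]
      rw [if_neg (by simpa using hne)]

lemma pvModifyHead_nil_append (l : List (List Char)) :
    l.modifyHead (fun x => ([] : List Char) ++ x) = l := by
  cases l <;> simp

-- ===== VERDICT (by name: the statement is the Claim_ definition above) =====
theorem parse_strategy_list_py_spec : Claim_equal_parse_strategy_list_py := by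
  intro raw _
  unfold Spec_parse_strategy_list_py parse_strategy_list_py parse_strategy_list_py_alt
  simp only [pvSplitOn_eq]
  congr 1
  rw [pvAStep_eq, pvItems_eq, List.nil_append, pvDedup_filter_eq]
  rw [show (fun (st : PySem.Set (List Char) × List (List Char) × List Char) (ch : Char) =>
      if ch == ',' then
        let token := PySem.Chars.stripChars st.2.2 ['_']
        if token ≠ [] && !(st.1.contains token) then
          (PySem.Set.add st.1 token, st.2.1 ++ [token], ([] : List Char))
        else
          (st.1, st.2.1, ([] : List Char))
      else
        let cl := PySem.Chars.lowerChar ch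
        if PySem.Chars.isalnum cl || cl == '_' then
          (st.1, st.2.1, st.2.2 ++ [cl])
        else st) = pvBStep from rfl]
  rw [pvScan_eq _ [] (([] : PySem.Set (List Char)), ([] : List (List Char)))]
  rw [pvModifyHead_nil_append]
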